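-- pv_equiv track=rewrite | github.com/dbis-ukon/lplm | compute_ground_truth.py | language_to_query
-- ===== SOURCE A (Python) =====
-- def language_to_query(list_languages):
--     """
--     Convert the transformed LIKE patterns to SQL-compatible queries.
--
--     Parameters:
--     list_languages (list of lists): The transformed patterns.
--
--     Returns:
--     list of lists: SQL queries with appropriate wildcard replacements.
--     """
--
--     list_queries = []
--     list_wildcards = ['$', '%', '_']
--     for con in list_languages:
--         list_pairs = []
--         for l in con:
--             query = ''
--             l_ = l.replace('%^', '_').replace('^%', '_').replace('^', '_').replace('@', ' ')
--             for i in range(len(l_)):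
--                 if len(query) == 0:
--                     query += l_[i]
--                 else:
--                     if query[-1] not in list_wildcards and l_[i] not in list_wildcards:
--                         query += '%' + l_[i]
--                     else:
--                         query += l_[i]
--             list_pairs.append(query.replace('$', ''))
--         list_queries.append(list_pairs)
--     return list_queries
-- ===== SOURCE B (Python) =====
-- import re
--
-- def language_to_query(list_languages):
--     return [
--         [_runs_to_query(l) for l in con]
--         for con in list_languages
--     ]
--
-- def _runs_to_query(l):
--     l_ = l.replace('%^', '_').replace('^%', '_').replace('^', '_').replace('@', ' ')
--     # split into maximal runs of wildcard / non-wildcard characters;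
--     # a non-wildcard run gets '%' between its characters, a wildcard run is kept verbatim
--     parts = re.findall(r'[$%_]+|[^$%_]+', l_)
--     query = ''.join(p if p[0] in '$%_' else '%'.join(p) for p in parts)
--     return query.replace('$', '')
-- ===== Notes on version B (the rewrite author's own statement) =====
-- stated objective: alternative
-- what changed: A's stateful character-by-character accumulator (which re-inspects query[-1] at every step) is replaced by a staged run decomposition: the string is first split with re.findall into maximal runs of wildcard / non-wildcard characters, then each non-wildcard run is joined with '%' and wildcard runs are kept verbatim, and the pieces are concatenated.
import Mathlib
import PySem

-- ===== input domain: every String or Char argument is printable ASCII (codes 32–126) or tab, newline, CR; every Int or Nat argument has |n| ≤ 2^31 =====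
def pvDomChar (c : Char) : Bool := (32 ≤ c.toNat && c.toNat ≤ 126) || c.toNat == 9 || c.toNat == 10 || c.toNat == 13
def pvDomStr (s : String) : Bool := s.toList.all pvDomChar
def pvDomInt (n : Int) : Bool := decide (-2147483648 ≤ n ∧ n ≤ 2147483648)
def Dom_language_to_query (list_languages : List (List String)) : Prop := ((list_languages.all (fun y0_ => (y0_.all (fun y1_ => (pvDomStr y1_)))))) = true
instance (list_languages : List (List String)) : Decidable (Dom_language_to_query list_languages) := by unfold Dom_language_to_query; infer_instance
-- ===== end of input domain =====

-- B replaces A's stateful character accumulator (re-inspecting query[-1]) by a staged run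
-- decomposition: split into maximal wildcard/non-wildcard runs, join non-wildcard runs with '%'.
-- Objective: alternative algorithm, same asymptotic cost.


-- ===== PORT A =====
-- list_wildcards = ['$', '%', '_']
def pvWildA : List Char := ['$', '%', '_']

-- l.replace('%^','_').replace('^%','_').replace('^','_').replace('@',' ')  (A's replace chain, on List Char)
def pvPrep (l : List Char) : List Char :=
  PySem.Chars.replace (PySem.Chars.replace (PySem.Chars.replace
    (PySem.Chars.replace l ['%', '^'] ['_']) ['^', '%'] ['_']) ['^'] ['_']) ['@'] [' ']

-- the inner 'for i in range(len(l_))' loop of A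
def pvLoopA (l_ : List Char) : List Char :=
  (PySem.List.pyRange 0 (l_.length : Int) 1).foldl (fun query i =>
    if query.length = 0 then
      query ++ [PySem.List.pyGetD l_ i ' ']
    else
      if PySem.List.pyGetD query (-1) ' ' ∉ pvWildA ∧ PySem.List.pyGetD l_ i ' ' ∉ pvWildA then
        query ++ ['%', PySem.List.pyGetD l_ i ' ']
      else
        query ++ [PySem.List.pyGetD l_ i ' ']) []

def language_to_query (list_languages : List (List String)) : List (List String) :=
  list_languages.foldl (fun list_queries con =>
    list_queries ++ [con.foldl (fun list_pairs l =>
      list_pairs ++ [String.ofList (PySem.Chars.replace (pvLoopA (pvPrep l.toList)) ['$'] [])]) []]) []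

-- ===== PORT B =====
-- l.replace('%^','_').replace('^%','_').replace('^','_').replace('@',' ')  (B's copy of the replace chain)
def pvPrepB (l : List Char) : List Char :=
  PySem.Chars.replace (PySem.Chars.replace (PySem.Chars.replace
    (PySem.Chars.replace l ['%', '^'] ['_']) ['^', '%'] ['_']) ['^'] ['_']) ['@'] [' ']

-- p[0] in '$%_'
def pvIsWild (c : Char) : Bool := c = '$' || c = '%' || c = '_'

-- re.findall(r'[$%_]+|[^$%_]+', l_): the maximal runs of wildcard / non-wildcard characters,
-- in order (hand port of the regex; exact because the two alternatives partition all characters)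
def pvRuns : List Char → List (List Char)
  | [] => []
  | c :: rest =>
    (c :: rest.takeWhile (fun d => pvIsWild d == pvIsWild c)) ::
      pvRuns (rest.dropWhile (fun d => pvIsWild d == pvIsWild c))
termination_by l => l.length
decreasing_by
  simpa using Nat.lt_succ_of_le (List.length_dropWhile_le _ _)

-- p if p[0] in '$%_' else '%'.join(p)   ('%'.join over a string's characters)
def pvJoinRun (r : List Char) : List Char :=
  match r with
  | [] => []
  | c :: _ => if pvIsWild c then r else PySem.Chars.join ['%'] (r.map (fun x => [x]))

-- ''.join(... for p in parts)
def pvLoopB (l_ : List Char) : List Char := (pvRuns l_).flatMap pvJoinRun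

def language_to_query_alt (list_languages : List (List String)) : List (List String) :=
  list_languages.map (fun con => con.map (fun l =>
    String.ofList (PySem.Chars.replace (pvLoopB (pvPrepB l.toList)) ['$'] [])))

-- ===== PRECONDITION & SPEC =====
def Spec_language_to_query (list_languages : List (List String)) (out : List (List String)) : Prop := out = language_to_query_alt list_languages
instance (list_languages : List (List String)) (out : List (List String)) : Decidable (Spec_language_to_query list_languages out) := by unfold Spec_language_to_query; infer_instance

-- ===== CLAIM (what is proved, stated in full; the proofs are below) =====
def Claim_equal_language_to_query : Prop := ∀ (list_languages : List (List String)), Dom_language_to_query list_languages → Spec_language_to_query list_languages (language_to_query list_languages)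

-- ===== LEMMAS AND PROOFS =====

-- A's fold step once the index has been resolved to the character it reads
def pvStepA (query : List Char) (c : Char) : List Char :=
  if query.length = 0 then query ++ [c]
  else
    if PySem.List.pyGetD query (-1) ' ' ∉ pvWildA ∧ c ∉ pvWildA then query ++ ['%', c]
    else query ++ [c]

-- common reference form: the output after the first character, as a function of the previous char
def pvTail (p : Char) : List Char → List Char
  | [] => []
  | c :: rest => (if pvIsWild p = false ∧ pvIsWild c = false then ['%', c] else [c]) ++ pvTail c rest

def pvHeadTail : List Char → List Char
  | [] => []
  | c :: rest => c :: pvTail c rest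

theorem pvWild_iff (c : Char) : c ∈ pvWildA ↔ pvIsWild c = true := by
  simp [pvWildA, pvIsWild]; tauto

-- loop invariant for A: a nonempty accumulator ending in p, fed the remaining characters
theorem pvLoop_inv (rest : List Char) (acc : List Char) (p : Char) :
    rest.foldl pvStepA (acc ++ [p]) = (acc ++ [p]) ++ pvTail p rest := by
  induction rest generalizing acc p with
  | nil => simp [pvTail]
  | cons c rest ih =>
    simp only [List.foldl_cons]
    have hstep : pvStepA (acc ++ [p]) c =
        (acc ++ [p]) ++ (if pvIsWild p = false ∧ pvIsWild c = false then ['%', c] else [c]) := by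
      simp only [pvStepA, PySem.List.pyGetD_neg_one_append_singleton]
      have hp := pvWild_iff p
      have hc := pvWild_iff c
      by_cases h1 : pvIsWild p = true <;> by_cases h2 : pvIsWild c = true <;>
        simp [h1, h2, hp, hc]
    rw [hstep]
    by_cases hw : pvIsWild p = false ∧ pvIsWild c = false
    · rw [if_pos hw, show ((acc ++ [p]) ++ ['%', c]) = ((acc ++ [p, '%']) ++ [c]) by simp,
        ih (acc ++ [p, '%']) c]
      simp [pvTail, hw]
    · rw [if_neg hw, show ((acc ++ [p]) ++ [c]) = ((acc ++ [p]) ++ [c]) from rfl,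
        ih (acc ++ [p]) c]
      simp [pvTail, hw]

theorem pvLoopA_eq (l_ : List Char) : pvLoopA l_ = pvHeadTail l_ := by
  have hA : pvLoopA l_ = List.foldl pvStepA [] l_ := by
    unfold pvLoopA
    rw [show ((l_.length : Int)) = PySem.List.len l_ by simp [PySem.List.len]]
    exact PySem.List.foldl_pyRange_zero_pyGetD l_ ' ' pvStepA []
  rw [hA]
  cases l_ with
  | nil => rfl
  | cons c rest =>
    have h0 : pvStepA [] c = [c] := by simp [pvStepA]
    have hinv := pvLoop_inv rest [] c
    simp only [List.nil_append] at hinv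
    simp only [List.foldl_cons, h0, hinv, pvHeadTail, List.singleton_append]

-- once the previous character cannot pair with the next one, pvTail restarts like pvHeadTail
theorem pvTail_eq_headTail (p : Char) (d : List Char)
    (h : ∀ d0, d.head? = some d0 → (pvIsWild p = true ∨ pvIsWild d0 = true)) :
    pvTail p d = pvHeadTail d := by
  cases d with
  | nil => rfl
  | cons d0 d' =>
    have := h d0 rfl
    have hcond : ¬ (pvIsWild p = false ∧ pvIsWild d0 = false) := by
      rcases this with h | h <;> simp [h]
    simp [pvTail, pvHeadTail, hcond]

-- within a run of the same wildcardness as p, followed by a run boundary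
theorem pvTail_run (t : List Char) (p : Char) (d : List Char)
    (ht : ∀ x ∈ t, pvIsWild x = pvIsWild p)
    (hd : ∀ d0, d.head? = some d0 → pvIsWild d0 ≠ pvIsWild p) :
    pvTail p (t ++ d) =
      (if pvIsWild p then t else t.flatMap (fun x => ['%', x])) ++ pvHeadTail d := by
  induction t generalizing p with
  | nil =>
    simp only [List.nil_append, List.flatMap_nil]
    rw [pvTail_eq_headTail p d (by
      intro d0 h0
      have := hd d0 h0
      cases hq : pvIsWild p <;> simp_all)]
    split <;> simp
  | cons x t ih =>
    have hx : pvIsWild x = pvIsWild p := ht x (by simp)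
    have hrec := ih x (fun y hy => by rw [ht y (by simp [hy]), hx]) (fun d0 h0 => by
      rw [hx]; exact hd d0 h0)
    cases hq : pvIsWild p with
    | true =>
      have : ¬ (pvIsWild p = false ∧ pvIsWild x = false) := by simp [hq]
      simp only [List.cons_append, pvTail, this]
      rw [hrec]
      simp [hx, hq]
    | false =>
      have : (pvIsWild p = false ∧ pvIsWild x = false) := by simp [hq, hx]
      simp only [List.cons_append, pvTail, if_pos this]
      rw [hrec]
      simp [hx, hq]

-- '%'.join over the characters of a nonempty string
theorem pvJoin_eq (c : Char) (t : List Char) :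
    PySem.Chars.join ['%'] ((c :: t).map (fun x => [x])) = c :: t.flatMap (fun x => ['%', x]) := by
  induction t generalizing c with
  | nil => rfl
  | cons x t ih =>
    have h := ih x
    simp only [List.map_cons] at h ⊢
    rw [PySem.Chars.join_cons_cons, h]
    simp

theorem pvLoopB_eq (l_ : List Char) : pvLoopB l_ = pvHeadTail l_ := by
  unfold pvLoopB
  induction hn : l_.length using Nat.strong_induction_on generalizing l_ with
  | _ n ih =>
    cases l_ with
    | nil => simp [pvRuns, pvHeadTail]
    | cons c rest =>
      rw [pvRuns]
      set t := rest.takeWhile (fun d => pvIsWild d == pvIsWild c) with hT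
      set d := rest.dropWhile (fun d => pvIsWild d == pvIsWild c) with hD
      have hlen : d.length < n := by
        have := List.length_dropWhile_le (fun d => pvIsWild d == pvIsWild c) rest
        simp [← hn, hD]; omega
      have hB : (pvRuns d).flatMap pvJoinRun = pvHeadTail d := ih d.length hlen d rfl
      have hsplit : rest = t ++ d := (List.takeWhile_append_dropWhile).symm
      have ht : ∀ x ∈ t, pvIsWild x = pvIsWild c := by
        intro x hx
        have := List.mem_takeWhile_imp hx
        simpa using this
      have hd : ∀ d0, d.head? = some d0 → pvIsWild d0 ≠ pvIsWild c := by
        intro d0 h0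
        have := List.head?_dropWhile_not (fun d => pvIsWild d == pvIsWild c) rest
        rw [← hD] at this
        simp [h0] at this
        exact this
      rw [List.flatMap_cons, hB]
      have hht : pvHeadTail (c :: rest) = c :: pvTail c rest := rfl
      rw [hht, hsplit, pvTail_run t c d ht hd]
      cases hq : pvIsWild c with
      | true => simp [pvJoinRun, hq]
      | false =>
        have hj := pvJoin_eq c t
        simp only [List.map_cons] at hj
        simp [pvJoinRun, hq, hj]

-- ===== VERDICT (by name: the statement is the Claim_ definition above) =====
theorem language_to_query_spec : Claim_equal_language_to_query := by
  intro list_languages _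
  unfold Spec_language_to_query language_to_query language_to_query_alt
  rw [PySem.List.foldl_append_singleton_eq_map
    (fun con : List String => con.foldl (fun list_pairs l =>
      list_pairs ++ [String.ofList (PySem.Chars.replace (pvLoopA (pvPrep l.toList)) ['$'] [])]) [])
    list_languages []]
  simp only [List.nil_append]
  apply List.map_congr_left
  intro con _
  rw [PySem.List.foldl_append_singleton_eq_map
    (fun l : String => String.ofList (PySem.Chars.replace (pvLoopA (pvPrep l.toList)) ['$'] []))
    con []]
  simp only [List.nil_append]
  apply List.map_congr_left
  intro l _
  rw [pvLoopA_eq, pvLoopB_eq, show pvPrep = pvPrepB from rfl]
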